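-- pv_equiv track=rewrite | github.com/maiamcc/crossings | crossings.py | get_reciprocal_xpoints
-- ===== SOURCE A (Python) =====
-- from typing import Any, Generator, Iterable, List, Set, Tuple
--
-- def sorted_tuple(*args, **kwargs):
--     return tuple(sorted(args, **kwargs))
--
-- CrossingPoint = Tuple[int, int]
--
-- def get_reciprocal_xpoints(xpoints: List[CrossingPoint], m: int, n: int) -> Set[Tuple[CrossingPoint]]:
--     res = set()
--     xpoints = set(xpoints)
--     for xp in xpoints:
--         reciprocal = (m-1-xp[0], n-1-xp[1])
--         if reciprocal in xpoints:
--             res.add(sorted_tuple(xp, reciprocal))  # make sure it goes into the set in consistent order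
--     return res
-- ===== SOURCE B (Python) =====
-- def sorted_tuple(*args, **kwargs):
--     return tuple(sorted(args, **kwargs))
--
--
-- def get_reciprocal_xpoints(xpoints, m, n):
--     # Group every point into a bucket keyed by its normalized pair
--     # {point, mirror}; a pair is a crossing pair exactly when its bucket
--     # ends up containing both endpoints of the key.
--     buckets = {}
--     for p in xpoints:
--         key = sorted_tuple(p, (m - 1 - p[0], n - 1 - p[1]))
--         buckets.setdefault(key, set()).add(p)
--     return {key for key, seen in buckets.items()
--             if all(q in seen for q in key)}
-- ===== Notes on version B (the rewrite author's own statement) =====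
-- stated objective: alternative
-- what changed: Replaced A's build-a-set-then-test-each-point's-reciprocal-for-membership loop by a hash-grouping algorithm: one pass buckets every point under its normalized pair key {p, mirror(p)} in a dict, then one pass over the buckets emits exactly the keys whose bucket contains both endpoints - no reciprocal membership test against the point set is ever made.
import Mathlib
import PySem

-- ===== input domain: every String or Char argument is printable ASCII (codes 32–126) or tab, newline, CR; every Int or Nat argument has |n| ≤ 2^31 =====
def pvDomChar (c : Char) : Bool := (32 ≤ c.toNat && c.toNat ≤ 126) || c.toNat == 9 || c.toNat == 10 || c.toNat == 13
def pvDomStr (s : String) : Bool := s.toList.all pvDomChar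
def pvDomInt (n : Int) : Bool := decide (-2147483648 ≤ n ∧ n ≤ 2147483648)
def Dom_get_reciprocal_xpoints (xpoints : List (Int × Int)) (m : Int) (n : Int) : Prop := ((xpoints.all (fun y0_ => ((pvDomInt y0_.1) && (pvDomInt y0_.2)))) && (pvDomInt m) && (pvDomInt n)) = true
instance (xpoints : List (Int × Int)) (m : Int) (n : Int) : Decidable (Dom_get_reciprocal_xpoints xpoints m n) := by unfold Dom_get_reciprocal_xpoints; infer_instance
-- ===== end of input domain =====

-- B replaces A's set-membership algorithm (test each point's reciprocal against the point
-- set) by hash-grouping: bucket every point under its normalized pair key in a dict, then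
-- emit the keys whose bucket contains both endpoints (objective: alternative, same cost).

-- ===== PORT A =====
-- helper sorted_tuple (tuple comparison is lexicographic = sorted2 with the two component keys)
def sortedTuple2 (args : List (Int × Int)) : List (Int × Int) :=
  PySem.List.sorted2 args Prod.fst Prod.snd false

def get_reciprocal_xpoints (xpoints : List (Int × Int)) (m : Int) (n : Int) : List (List (Int × Int)) :=
  let xpointsS : PySem.Set (Int × Int) := PySem.Set.ofList xpoints
  List.foldl (fun res xp =>
      let reciprocal : Int × Int := (m - 1 - xp.1, n - 1 - xp.2)
      if PySem.Set.contains xpointsS reciprocal then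
        PySem.Set.add res (sortedTuple2 [xp, reciprocal])
      else res)
    PySem.Set.empty xpointsS

-- ===== PORT B =====
def get_reciprocal_xpoints_alt (xpoints : List (Int × Int)) (m : Int) (n : Int) : List (List (Int × Int)) :=
  -- buckets.setdefault(key, set()).add(p)  =  Dict.modify key ∅ (·.add p)
  let buckets : PySem.Dict (List (Int × Int)) (PySem.Set (Int × Int)) :=
    xpoints.foldl (fun d p =>
        d.modify (sortedTuple2 [p, (m - 1 - p.1, n - 1 - p.2)]) PySem.Set.empty
          (fun s => PySem.Set.add s p))
      PySem.Dict.empty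
  -- {key for key, seen in buckets.items() if all(q in seen for q in key)}
  List.foldl (fun res kv =>
      if kv.1.all (fun q => PySem.Set.contains kv.2 q) then PySem.Set.add res kv.1 else res)
    PySem.Set.empty buckets.items

-- ===== PRECONDITION & SPEC =====
def Spec_get_reciprocal_xpoints (xpoints : List (Int × Int)) (m : Int) (n : Int) (out : List (List (Int × Int))) : Prop := out = get_reciprocal_xpoints_alt xpoints m n
instance (xpoints : List (Int × Int)) (m : Int) (n : Int) (out : List (List (Int × Int))) : Decidable (Spec_get_reciprocal_xpoints xpoints m n out) := by unfold Spec_get_reciprocal_xpoints; infer_instance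

-- ===== CLAIM (what is proved, stated in full; the proofs are below) =====
def Claim_equal_get_reciprocal_xpoints : Prop := ∀ (xpoints : List (Int × Int)) (m : Int) (n : Int), Dom_get_reciprocal_xpoints xpoints m n → Spec_get_reciprocal_xpoints xpoints m n (get_reciprocal_xpoints xpoints m n)

-- ===== LEMMAS AND PROOFS =====

-- B's bucket key of a point (proof-side abbreviation for the expression both ports build)
def pvKey (m n : Int) (p : Int × Int) : List (Int × Int) :=
  sortedTuple2 [p, (m - 1 - p.1, n - 1 - p.2)]

-- the strict lexicographic order sorted2 uses on pairs
def pvLt (x y : Int × Int) : Bool :=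
  decide (x.1 < y.1) || (!decide (y.1 < x.1) && decide (x.2 < y.2))

theorem sortedTuple2_pair (x y : Int × Int) :
    sortedTuple2 [x, y] = if pvLt y x then [y, x] else [x, y] := by
  simp [sortedTuple2, PySem.List.sorted2, PySem.List.insertBy, pvLt]

theorem mem_sortedTuple2_pair (x y q : Int × Int) :
    q ∈ sortedTuple2 [x, y] ↔ q = x ∨ q = y := by
  rw [sortedTuple2_pair]
  split_ifs
  · constructor
    · intro h; rcases List.mem_cons.mp h with rfl | h; · exact Or.inr rfl
      · exact Or.inl (List.mem_singleton.mp h)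
    · rintro (rfl | rfl) <;> simp
  · constructor
    · intro h; rcases List.mem_cons.mp h with rfl | h; · exact Or.inl rfl
      · exact Or.inr (List.mem_singleton.mp h)
    · rintro (rfl | rfl) <;> simp

theorem sortedTuple2_comm (x y : Int × Int) :
    sortedTuple2 [x, y] = sortedTuple2 [y, x] := by
  obtain ⟨a, b⟩ := x; obtain ⟨c, d⟩ := y
  rw [sortedTuple2_pair, sortedTuple2_pair]
  simp only [pvLt, Bool.or_eq_true, Bool.and_eq_true, Bool.not_eq_true', decide_eq_true_eq,
    decide_eq_false_iff_not]
  split_ifs with h1 h2 h2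
  · exfalso; omega
  · rfl
  · rfl
  · have h : a = c ∧ b = d := by omega
    rw [h.1, h.2]

theorem pvKey_recip (m n : Int) (p : Int × Int) :
    pvKey m n (m - 1 - p.1, n - 1 - p.2) = pvKey m n p := by
  unfold pvKey
  have h : (m - 1 - (m - 1 - p.1), n - 1 - (n - 1 - p.2)) = p := by
    obtain ⟨a, b⟩ := p; simp only [Prod.mk.injEq]; omega
  rw [h, sortedTuple2_comm]

-- folding a guarded step over a list = folding the step over the filtered list
theorem foldl_if_eq_foldl_filter {α β : Type} (c : α → Bool) (g : β → α → β)
    (l : List α) (init : β) :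
    List.foldl (fun r x => if c x then g r x else r) init l
      = List.foldl g init (l.filter c) := by
  induction l generalizing init with
  | nil => rfl
  | cons x t ih =>
    by_cases h : c x = true <;> simp [h, ih]

-- --- dedup (Set.ofList) commutes with filter and absorbs an inner dedup under map ---

theorem discard_filter_comm {α : Type} [BEq α] (s : List α) (p : α → Bool) (x : α) :
    (s.filter p).filter (fun y => !y == x) = (s.filter (fun y => !y == x)).filter p := by
  simp only [List.filter_filter]
  exact List.filter_congr (fun a _ => Bool.and_comm _ _)

theorem filter_idem {α : Type} (p : α → Bool) (l : List α) :
    (l.filter p).filter p = l.filter p := by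
  rw [List.filter_filter]; simp

theorem ofList_filter {α : Type} [BEq α] [LawfulBEq α] (p : α → Bool) (l : List α) :
    PySem.Set.ofList (l.filter p) = (PySem.Set.ofList l).filter p := by
  induction l with
  | nil => rfl
  | cons x xs ih =>
    by_cases hp : p x = true
    · rw [List.filter_cons_of_pos hp, PySem.Set.ofList_cons, PySem.Set.ofList_cons, ih]
      simp only [PySem.Set.discard, List.filter_cons_of_pos hp]
      rw [discard_filter_comm]
    · rw [List.filter_cons_of_neg (by simp_all), PySem.Set.ofList_cons, ih]
      simp only [PySem.Set.discard]
      rw [List.filter_cons_of_neg (by simp_all)]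
      rw [← discard_filter_comm]
      refine (List.filter_eq_self.mpr fun a ha => ?_).symm
      have hpa : p a = true := List.of_mem_filter ha
      have : a ≠ x := fun hax => by rw [hax] at hpa; exact hp hpa
      simp [this]

theorem ofList_map_discard {α β : Type} [BEq α] [LawfulBEq α] [BEq β] [LawfulBEq β]
    (f : α → β) (x : α) (s : List α) :
    (PySem.Set.ofList ((s.filter (fun y => !y == x)).map f)).filter (fun z => !z == f x)
      = (PySem.Set.ofList (s.map f)).filter (fun z => !z == f x) := by
  induction s with
  | nil => rfl
  | cons y ys ih =>
    by_cases hyx : y = x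
    · subst hyx
      rw [List.filter_cons_of_neg (by simp), List.map_cons, PySem.Set.ofList_cons]
      rw [List.filter_cons_of_neg (by simp)]
      simp only [PySem.Set.discard]
      rw [filter_idem]
      exact ih
    · rw [List.filter_cons_of_pos (by simp [hyx]), List.map_cons, List.map_cons,
        PySem.Set.ofList_cons, PySem.Set.ofList_cons]
      simp only [PySem.Set.discard]
      by_cases hfy : f y = f x
      · rw [List.filter_cons_of_neg (by simp [hfy]), List.filter_cons_of_neg (by simp [hfy])]
        rw [hfy, filter_idem, filter_idem]
        exact ih
      · rw [List.filter_cons_of_pos (by simp [hfy]), List.filter_cons_of_pos (by simp [hfy])]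
        congr 1
        rw [discard_filter_comm _ (fun z => !z == f y) (f x)]
        rw [ih]
        rw [← discard_filter_comm _ (fun z => !z == f y) (f x)]

theorem ofList_map_ofList {α β : Type} [BEq α] [LawfulBEq α] [BEq β] [LawfulBEq β]
    (f : α → β) (l : List α) :
    PySem.Set.ofList ((PySem.Set.ofList l).map f) = PySem.Set.ofList (l.map f) := by
  induction l with
  | nil => rfl
  | cons x xs ih =>
    rw [PySem.Set.ofList_cons, List.map_cons, List.map_cons, PySem.Set.ofList_cons,
      PySem.Set.ofList_cons]
    simp only [PySem.Set.discard]
    rw [ofList_map_discard f x ((PySem.Set.ofList xs) : List α), ih]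

theorem ofList_of_nodup {α : Type} [BEq α] [LawfulBEq α] (l : List α) (h : l.Nodup) :
    PySem.Set.ofList l = l := by
  induction l with
  | nil => rfl
  | cons x xs ih =>
    rw [PySem.Set.ofList_cons, ih (List.Nodup.of_cons h)]
    simp only [PySem.Set.discard]
    congr 1
    refine List.filter_eq_self.mpr fun a ha => ?_
    have : a ≠ x := fun hax => (List.nodup_cons.mp h).1 (hax ▸ ha)
    simp [this]

-- --- the buckets dict of B ---

def pvBuckets (xpoints : List (Int × Int)) (m n : Int) :
    PySem.Dict (List (Int × Int)) (PySem.Set (Int × Int)) :=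
  xpoints.foldl (fun d p =>
      d.modify (pvKey m n p) PySem.Set.empty (fun s => PySem.Set.add s p))
    PySem.Dict.empty

theorem mem_bucket_foldl (m n : Int) (l : List (Int × Int))
    (d : PySem.Dict (List (Int × Int)) (PySem.Set (Int × Int)))
    (k : List (Int × Int)) (q : Int × Int) :
    q ∈ (l.foldl (fun d p =>
        d.modify (pvKey m n p) PySem.Set.empty (fun s => PySem.Set.add s p)) d).getD k
          PySem.Set.empty
      ↔ q ∈ d.getD k PySem.Set.empty ∨ (q ∈ l ∧ pvKey m n q = k) := by
  induction l using List.reverseRecOn with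
  | nil => simp
  | append_singleton l p ih =>
    rw [List.foldl_append, List.foldl_cons, List.foldl_nil]
    rw [PySem.Dict.getD_modify]
    by_cases hk : k = pvKey m n p
    · subst hk
      rw [if_pos rfl, PySem.Set.mem_add, ih]
      constructor
      · rintro ((h | h) | rfl)
        · exact Or.inl h
        · exact Or.inr ⟨by simp [h.1], h.2⟩
        · exact Or.inr ⟨by simp, rfl⟩
      · rintro (h | ⟨hq, hkey⟩)
        · exact Or.inl (Or.inl h)
        · rcases List.mem_append.mp hq with h | h
          · exact Or.inl (Or.inr ⟨h, hkey⟩)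
          · exact Or.inr (List.mem_singleton.mp h)
    · rw [if_neg hk, ih]
      constructor
      · rintro (h | ⟨hq, hkey⟩)
        · exact Or.inl h
        · exact Or.inr ⟨by simp [hq], hkey⟩
      · rintro (h | ⟨hq, hkey⟩)
        · exact Or.inl h
        · rcases List.mem_append.mp hq with h | h
          · exact Or.inr ⟨h, hkey⟩
          · exact absurd (List.mem_singleton.mp h ▸ hkey).symm hk

theorem mem_bucket (xpoints : List (Int × Int)) (m n : Int) (k : List (Int × Int))
    (q : Int × Int) :
    q ∈ (pvBuckets xpoints m n).getD k PySem.Set.empty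
      ↔ q ∈ xpoints ∧ pvKey m n q = k := by
  rw [pvBuckets, mem_bucket_foldl]
  simp [PySem.Dict.getD, PySem.Dict.get?, PySem.Dict.empty, PySem.Set.empty]

theorem keys_buckets (xpoints : List (Int × Int)) (m n : Int) :
    (pvBuckets xpoints m n).keys = PySem.Set.ofList (xpoints.map (pvKey m n)) := by
  rw [pvBuckets,
    PySem.Dict.keys_foldl_modify_key xpoints (pvKey m n) PySem.Set.empty
      (fun _ p => fun s => PySem.Set.add s p) PySem.Dict.empty]
  rw [PySem.Set.ofList_eq_foldl]
  rfl

-- in a dict with nodup keys, (k,v) ∈ items determines get? k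
theorem get?_of_mem_items {κ ν : Type} [BEq κ] [LawfulBEq κ]
    (ps : List (κ × ν)) (h : (ps.map Prod.fst).Nodup) (k : κ) (v : ν)
    (hm : (k, v) ∈ ps) : (PySem.Dict.mk ps).get? k = some v := by
  induction ps with
  | nil => cases hm
  | cons q rest ih =>
    rw [List.map_cons] at h
    have h' := List.nodup_cons.mp h
    rw [show PySem.Dict.mk (q :: rest) = PySem.Dict.mk ((q.1, q.2) :: rest) by rfl,
      PySem.Dict.get?_mk_cons]
    rcases List.mem_cons.mp hm with rfl | hm'
    · simp
    · have hne : (q.1 == k) = false := by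
        simp only [beq_eq_false_iff_ne, ne_eq]
        intro he
        exact h'.1 (he ▸ List.mem_map.mpr ⟨(k, v), hm', rfl⟩)
      rw [hne]
      simp only [Bool.false_eq_true, if_false]
      exact ih h'.2 hm'

-- B's bucket condition, named for the proofs
def pvGood (xpoints : List (Int × Int)) (m n : Int) (k : List (Int × Int)) : Bool :=
  k.all (fun q => PySem.Set.contains ((pvBuckets xpoints m n).getD k PySem.Set.empty) q)

-- fold of guarded adds of g x = fold of add over the mapped list
theorem foldl_add_map {α β : Type} [BEq β] (g : α → β) (l : List α) (init : PySem.Set β) :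
    List.foldl (fun r x => PySem.Set.add r (g x)) init l
      = List.foldl PySem.Set.add init (l.map g) := by
  induction l generalizing init with
  | nil => rfl
  | cons x t ih => simp [ih]

-- the crux: for p among the points, A's membership test equals B's bucket condition on key p
theorem cond_eq (xpoints : List (Int × Int)) (m n : Int) (p : Int × Int)
    (hp : p ∈ xpoints) :
    PySem.Set.contains (PySem.Set.ofList xpoints) (m - 1 - p.1, n - 1 - p.2)
      = pvGood xpoints m n (pvKey m n p) := by
  rw [Bool.eq_iff_iff]
  simp only [pvGood, PySem.Set.contains, List.contains_iff_mem, List.all_eq_true]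
  rw [PySem.Set.mem_ofList]
  constructor
  · intro hr q hq
    rw [mem_bucket]
    rcases (mem_sortedTuple2_pair _ _ _).mp hq with rfl | rfl
    · exact ⟨hp, rfl⟩
    · exact ⟨hr, pvKey_recip m n p⟩
  · intro hall
    have hr := hall (m - 1 - p.1, n - 1 - p.2)
      ((mem_sortedTuple2_pair _ _ _).mpr (Or.inr rfl))
    exact ((mem_bucket _ _ _ _ _).mp hr).1

-- B's fold over items = the guarded fold over the keys
theorem b_fold_keys (xpoints : List (Int × Int)) (m n : Int) :
    List.foldl (fun res kv =>
        if kv.1.all (fun q => PySem.Set.contains kv.2 q) then PySem.Set.add res kv.1 else res)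
      PySem.Set.empty (pvBuckets xpoints m n).items
      = List.foldl (fun res k =>
          if pvGood xpoints m n k then PySem.Set.add res k else res)
        PySem.Set.empty (pvBuckets xpoints m n).keys := by
  have hkeysnd : ((pvBuckets xpoints m n).items.map Prod.fst).Nodup := by
    have hk := keys_buckets xpoints m n
    simp only [PySem.Dict.keys] at hk
    rw [show (fun x : (List (Int × Int)) × PySem.Set (Int × Int) => x.1) = Prod.fst from rfl]
      at hk
    rw [hk]
    exact PySem.Set.nodup_ofList _
  rw [PySem.List.foldl_congr_mem _ _
    (fun res kv =>
      if pvGood xpoints m n kv.1 then PySem.Set.add res kv.1 else res) _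
    (by
      rintro acc ⟨k, v⟩ hkv
      have hg : (pvBuckets xpoints m n).get? k = some v :=
        get?_of_mem_items (pvBuckets xpoints m n).items hkeysnd k v hkv
      simp only [pvGood, PySem.Dict.getD, hg, Option.getD_some])]
  rw [PySem.Dict.keys, List.foldl_map]

-- ===== VERDICT (by name: the statement is the Claim_ definition above) =====
theorem get_reciprocal_xpoints_spec : Claim_equal_get_reciprocal_xpoints := by
  intro xpoints m n _
  show get_reciprocal_xpoints xpoints m n = get_reciprocal_xpoints_alt xpoints m n
  have hA : get_reciprocal_xpoints xpoints m n
      = ((PySem.Set.ofList (xpoints.map (pvKey m n))) : List (List (Int × Int))).filter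
          (pvGood xpoints m n) := by
    have h1 : get_reciprocal_xpoints xpoints m n
        = List.foldl (fun r x =>
            if PySem.Set.contains (PySem.Set.ofList xpoints) (m - 1 - x.1, n - 1 - x.2)
            then PySem.Set.add r (pvKey m n x) else r)
          PySem.Set.empty (PySem.Set.ofList xpoints) := rfl
    rw [h1, foldl_if_eq_foldl_filter, foldl_add_map]
    have h5 : ((PySem.Set.ofList xpoints) : List (Int × Int)).filter
          (fun x => PySem.Set.contains (PySem.Set.ofList xpoints) (m - 1 - x.1, n - 1 - x.2))
        = ((PySem.Set.ofList xpoints) : List (Int × Int)).filter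
          (fun x => pvGood xpoints m n (pvKey m n x)) :=
      List.filter_congr fun p hp => cond_eq xpoints m n p ((PySem.Set.mem_ofList _ _).mp hp)
    rw [h5]
    have h6 : ((((PySem.Set.ofList xpoints) : List (Int × Int)).filter
          (fun x => pvGood xpoints m n (pvKey m n x))).map (pvKey m n))
        = ((((PySem.Set.ofList xpoints) : List (Int × Int)).map (pvKey m n)).filter
            (pvGood xpoints m n)) :=
      (List.filter_map (f := pvKey m n) (p := pvGood xpoints m n)
        (l := ((PySem.Set.ofList xpoints) : List (Int × Int)))).symm
    rw [h6]
    rw [show (PySem.Set.empty : PySem.Set (List (Int × Int))) = [] from rfl]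
    rw [← PySem.Set.ofList_eq_foldl, ofList_filter, ofList_map_ofList]
  have hBfold : get_reciprocal_xpoints_alt xpoints m n
      = List.foldl (fun res kv =>
          if kv.1.all (fun q => PySem.Set.contains kv.2 q) then PySem.Set.add res kv.1 else res)
        PySem.Set.empty (pvBuckets xpoints m n).items := rfl
  have hB : get_reciprocal_xpoints_alt xpoints m n
      = ((PySem.Set.ofList (xpoints.map (pvKey m n))) : List (List (Int × Int))).filter
          (pvGood xpoints m n) := by
    rw [hBfold, b_fold_keys, foldl_if_eq_foldl_filter]
    have : List.foldl (fun (r : PySem.Set (List (Int × Int))) k => PySem.Set.add r k)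
          PySem.Set.empty (((pvBuckets xpoints m n).keys).filter (pvGood xpoints m n))
        = PySem.Set.ofList (((pvBuckets xpoints m n).keys).filter (pvGood xpoints m n)) :=
      (PySem.Set.ofList_eq_foldl _).symm
    rw [this, keys_buckets, ofList_filter, ofList_of_nodup _ (PySem.Set.nodup_ofList _)]
  rw [hA, hB]
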